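-- pv_equiv track=rewrite | github.com/DaveMLBB/magicdeckgen | backend/app/routers/decks.py | parse_mana_cost
-- ===== SOURCE A (Python) =====
-- def parse_mana_cost(mana_cost: str) -> int:
--     """Calcola CMC da stringa mana cost"""
--     if not mana_cost or mana_cost == 'None':
--         return 0
--     cmc = 0
--     i = 0
--     while i < len(mana_cost):
--         char = mana_cost[i]
--         if char.isdigit():
--             num = ""
--             while i < len(mana_cost) and mana_cost[i].isdigit():
--                 num += mana_cost[i]
--                 i += 1
--             cmc += int(num)
--             continue
--         elif char in 'WUBRG':
--             cmc += 1
--         i += 1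
--     return cmc
-- ===== SOURCE B (Python) =====
-- def parse_mana_cost(mana_cost: str) -> int:
--     """Calcola CMC da stringa mana cost"""
--     if not mana_cost or mana_cost == 'None':
--         return 0
--     # stage 1: mask every non-digit to a space, split on whitespace -> the maximal digit runs
--     runs = ''.join(ch if ch.isdigit() else ' ' for ch in mana_cost).split()
--     # stage 2: count colored symbols in a separate pass
--     colored = sum(ch in 'WUBRG' for ch in mana_cost)
--     return sum(int(run) for run in runs) + colored
-- ===== Notes on version B (the rewrite author's own statement) =====
-- stated objective: alternative
-- what changed: Replaces A's index-based nested-while state machine by two independent staged passes: mask non-digits to spaces and str.split() the string into its maximal digit runs (summed with int), plus a separate membership-sum pass counting WUBRG symbols; the bulk str.split/join work runs in C instead of a per-character Python loop.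
import Mathlib
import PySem

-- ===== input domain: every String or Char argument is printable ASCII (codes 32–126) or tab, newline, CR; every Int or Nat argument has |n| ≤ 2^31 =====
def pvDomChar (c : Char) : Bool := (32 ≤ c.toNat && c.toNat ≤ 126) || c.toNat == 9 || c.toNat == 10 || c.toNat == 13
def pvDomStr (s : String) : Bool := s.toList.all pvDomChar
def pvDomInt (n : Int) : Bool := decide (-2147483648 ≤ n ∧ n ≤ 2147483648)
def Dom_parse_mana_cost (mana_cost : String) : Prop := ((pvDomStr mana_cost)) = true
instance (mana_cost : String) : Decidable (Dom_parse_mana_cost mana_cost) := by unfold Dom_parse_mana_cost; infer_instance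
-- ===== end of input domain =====

-- B replaces A's index-based nested-while state machine by two staged passes:
-- mask-to-spaces + str.split() for the digit runs, and a separate WUBRG membership sum
-- (alternative decomposition, same return value).

-- ===== PORT A =====
-- A's inner `while … isdigit` loop: (the collected digit run, the remaining chars).
def pvAInner : List Char → List Char × List Char
  | [] => ([], [])
  | c :: rest =>
    if PySem.Chars.isdigit c then
      let p := pvAInner rest
      (c :: p.1, p.2)
    else ([], c :: rest)

-- needed by pvALoop's termination proof (cited in decreasing_by)
theorem pvAInner_snd_le (l : List Char) : (pvAInner l).2.length ≤ l.length := by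
  induction l with
  | nil => simp [pvAInner]
  | cons c rest ih =>
    by_cases h : PySem.Chars.isdigit c <;> simp [pvAInner, h]
    omega

-- A's outer `while i < len(mana_cost)` loop, over the remaining characters.
def pvALoop : List Char → Int → Int
  | [], cmc => cmc
  | c :: rest, cmc =>
    if h : PySem.Chars.isdigit c then
      pvALoop (pvAInner (c :: rest)).2
        (cmc + (PySem.Int.ofChars? (pvAInner (c :: rest)).1).getD 0)
    else if PySem.Chars.isIn [c] ['W', 'U', 'B', 'R', 'G'] then
      pvALoop rest (cmc + 1)
    else
      pvALoop rest cmc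
termination_by l _ => l.length
decreasing_by
  · have := pvAInner_snd_le rest
    simp [pvAInner, h]
    omega
  · simp
  · simp

def parse_mana_cost (mana_cost : String) : Int :=
  if mana_cost = "" || mana_cost = "None" then 0
  else pvALoop mana_cost.toList 0

-- ===== PORT B =====
-- `''.join(ch if ch.isdigit() else ' ' for ch in mana_cost)`
def pvMask (l : List Char) : List Char :=
  l.map (fun ch => if PySem.Chars.isdigit ch then ch else ' ')

def parse_mana_cost_alt (mana_cost : String) : Int :=
  if mana_cost = "" || mana_cost = "None" then 0
  else
    -- runs = masked.split(); sum(int(run) for run in runs)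
    ((PySem.Chars.split₀ (pvMask mana_cost.toList)).map
        (fun run => (PySem.Int.ofChars? run).getD 0)).sum
      -- + sum(ch in 'WUBRG' for ch in mana_cost)
      + (mana_cost.toList.map
          (fun ch => if PySem.Chars.isIn [ch] ['W', 'U', 'B', 'R', 'G'] then (1 : Int) else 0)).sum

-- ===== PRECONDITION & SPEC =====
def Spec_parse_mana_cost (mana_cost : String) (out : Int) : Prop := out = parse_mana_cost_alt mana_cost
instance (mana_cost : String) (out : Int) : Decidable (Spec_parse_mana_cost mana_cost out) := by unfold Spec_parse_mana_cost; infer_instance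

-- ===== CLAIM (what is proved, stated in full; the proofs are below) =====
def Claim_equal_parse_mana_cost : Prop := ∀ (mana_cost : String), Dom_parse_mana_cost mana_cost → Spec_parse_mana_cost mana_cost (parse_mana_cost mana_cost)

-- ===== LEMMAS AND PROOFS =====

-- abbreviations for B's two stage results (proof-only helpers)
def pvRunsSum (l : List Char) : Int :=
  ((PySem.Chars.split₀ (pvMask l)).map (fun run => (PySem.Int.ofChars? run).getD 0)).sum

def pvColored (l : List Char) : Int :=
  (l.map (fun ch => if PySem.Chars.isIn [ch] ['W', 'U', 'B', 'R', 'G'] then (1 : Int) else 0)).sum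

theorem pvAInner_eq (l : List Char) :
    pvAInner l = (l.takeWhile PySem.Chars.isdigit, l.dropWhile PySem.Chars.isdigit) := by
  induction l with
  | nil => simp [pvAInner]
  | cons c rest ih =>
    by_cases h : PySem.Chars.isdigit c <;>
      simp [pvAInner, h, ih]

theorem pv_digit_not_space {c : Char} (h : PySem.Chars.isdigit c = true) :
    PySem.Chars.isspace c = false := by
  simp only [PySem.Chars.isdigit, Bool.and_eq_true, decide_eq_true_eq, Char.le_def] at h
  simp only [PySem.Chars.isspace, Char.toNat]
  have h1 : 48 ≤ c.val.toNat := h.1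
  have h2 : c.val.toNat ≤ 57 := h.2
  simp only [Bool.or_eq_false_iff, Bool.and_eq_false_iff, decide_eq_false_iff_not]
  omega

theorem pv_digit_not_wubrg {c : Char} (h : PySem.Chars.isdigit c = true) :
    PySem.Chars.isIn [c] ['W', 'U', 'B', 'R', 'G'] = false := by
  by_contra hne
  have ht : PySem.Chars.isIn [c] ['W', 'U', 'B', 'R', 'G'] = true := by
    cases hb : PySem.Chars.isIn [c] ['W', 'U', 'B', 'R', 'G'] <;> simp_all
  have hin : ([c] : List Char) <:+: ['W', 'U', 'B', 'R', 'G'] :=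
    (PySem.Chars.isIn_iff_infix _ _).mp ht
  have hmem : c ∈ (['W', 'U', 'B', 'R', 'G'] : List Char) :=
    hin.sublist.subset (List.mem_singleton.mpr rfl)
  fin_cases hmem <;> exact absurd h (by decide)

theorem pv_go_block (run : List Char) (hrun : ∀ c ∈ run, PySem.Chars.isspace c = false) :
    ∀ (t cur : List Char) (acc : List (List Char)),
      PySem.Chars.split₀.go (run ++ t) cur acc = PySem.Chars.split₀.go t (run.reverse ++ cur) acc := by
  induction run with
  | nil => intro t cur acc; simp
  | cons c rs ih =>
    intro t cur acc
    have hc : PySem.Chars.isspace c = false := hrun c (by simp)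
    have ih' := ih (fun d hd => hrun d (by simp [hd]))
    simp [PySem.Chars.split₀.go, hc, ih']

-- the accumulator of split₀.go is a prefix of the result
theorem pv_go_acc (t : List Char) :
    ∀ (cur : List Char) (acc : List (List Char)),
      PySem.Chars.split₀.go t cur acc = acc.reverse ++ PySem.Chars.split₀.go t cur [] := by
  induction t with
  | nil =>
    intro cur acc
    by_cases hc : cur.isEmpty <;> simp [PySem.Chars.split₀.go, hc]
  | cons c t ih =>
    intro cur acc
    by_cases hs : PySem.Chars.isspace c
    · by_cases hc : cur.isEmpty
      · simp only [PySem.Chars.split₀.go, hs, hc, if_true]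
        exact ih [] acc
      · simp only [PySem.Chars.split₀.go, hs, hc, if_true, Bool.false_eq_true, if_false]
        rw [ih [] (cur.reverse :: acc), ih [] [cur.reverse]]
        simp
    · simp only [PySem.Chars.split₀.go, hs, Bool.false_eq_true, if_false]
      exact ih (c :: cur) acc

-- split₀ of a nonempty spaceless block followed by a space-or-nothing tail
theorem pv_split_block (run tail : List Char) (hne : run ≠ [])
    (hrun : ∀ c ∈ run, PySem.Chars.isspace c = false)
    (htail : tail = [] ∨ ∃ t, tail = ' ' :: t) :
    PySem.Chars.split₀ (run ++ tail) = run :: PySem.Chars.split₀ tail := by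
  have hre : run.reverse.isEmpty = false := by
    cases run with
    | nil => exact absurd rfl hne
    | cons a l => simp
  rcases htail with h | ⟨t, ht⟩
  · subst h
    simp only [PySem.Chars.split₀]
    rw [pv_go_block run hrun [] [] []]
    simp [PySem.Chars.split₀.go, hre]
  · subst ht
    have hsp : PySem.Chars.isspace ' ' = true := by decide
    simp only [PySem.Chars.split₀]
    rw [pv_go_block run hrun (' ' :: t) [] []]
    simp only [PySem.Chars.split₀.go, hsp, if_true, List.append_nil, hre,
      Bool.false_eq_true, if_false, List.isEmpty_nil]
    rw [pv_go_acc t [] [run.reverse.reverse]]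
    simp

-- masking keeps an all-digit block unchanged
theorem pv_mask_digits (run : List Char) (h : ∀ c ∈ run, PySem.Chars.isdigit c = true) :
    pvMask run = run := by
  unfold pvMask
  calc run.map (fun ch => if PySem.Chars.isdigit ch then ch else ' ')
      = run.map id := List.map_congr_left (fun c hc => by simp [h c hc])
    _ = run := List.map_id run

theorem pv_colored_digits (run : List Char) (h : ∀ c ∈ run, PySem.Chars.isdigit c = true) :
    pvColored run = 0 := by
  unfold pvColored
  rw [List.map_congr_left
        (fun c hc => by simp [pv_digit_not_wubrg (h c hc)] :
          ∀ c ∈ run,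
            (if PySem.Chars.isIn [c] ['W', 'U', 'B', 'R', 'G'] then (1 : Int) else 0) = 0)]
  simp

theorem pv_colored_append (a b : List Char) : pvColored (a ++ b) = pvColored a + pvColored b := by
  simp [pvColored]

-- main loop invariant: A's loop computes B's two staged sums
theorem pvALoop_eq (l : List Char) (cmc : Int) :
    pvALoop l cmc = cmc + pvRunsSum l + pvColored l := by
  induction l, cmc using pvALoop.induct with
  | case1 cmc =>
    simp [pvALoop, pvRunsSum, pvColored, pvMask, PySem.Chars.split₀, PySem.Chars.split₀.go]
  | case2 c rest cmc h ih =>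
    rw [pvALoop]
    simp only [h, dite_true]
    rw [ih]
    have hrun : ∀ d ∈ (c :: rest).takeWhile PySem.Chars.isdigit, PySem.Chars.isdigit d = true :=
      fun _ hd => List.mem_takeWhile_imp hd
    have hA := pvAInner_eq (c :: rest)
    set run := (c :: rest).takeWhile PySem.Chars.isdigit with hrdef
    set tl := (c :: rest).dropWhile PySem.Chars.isdigit with htdef
    have hne : run ≠ [] := by
      rw [hrdef]; simp [h]
    have hdecomp : (c :: rest) = run ++ tl := (List.takeWhile_append_dropWhile).symm
    have hnospace : ∀ d ∈ run, PySem.Chars.isspace d = false :=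
      fun d hd => pv_digit_not_space (hrun d hd)
    have hmask : pvMask (c :: rest) = run ++ pvMask tl := by
      have hm := pv_mask_digits run hrun
      rw [hdecomp]
      unfold pvMask at hm ⊢
      rw [List.map_append, hm]
    have htail : pvMask tl = [] ∨ ∃ t, pvMask tl = ' ' :: t := by
      cases htl : tl with
      | nil => left; simp [pvMask]
      | cons d t =>
        right
        have hd : PySem.Chars.isdigit d = false := by
          have := List.head_dropWhile_not (p := PySem.Chars.isdigit) (l := c :: rest)
          rw [← htdef, htl] at this
          simpa using this (by simp)
        exact ⟨pvMask t, by simp [pvMask, hd]⟩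
      -- digit-block split of B's first stage
    have hsplit : PySem.Chars.split₀ (pvMask (c :: rest)) = run :: PySem.Chars.split₀ (pvMask tl) := by
      rw [hmask]
      exact pv_split_block run (pvMask tl) hne hnospace htail
    have hruns : pvRunsSum (c :: rest) = (PySem.Int.ofChars? run).getD 0 + pvRunsSum tl := by
      simp [pvRunsSum, hsplit]
    have hcol : pvColored (c :: rest) = pvColored tl := by
      rw [hdecomp, pv_colored_append, pv_colored_digits run hrun]; ring
    rw [hA]
    simp only [hA] at *
    rw [hruns, hcol]
    ring
  | case3 c rest cmc h hw ih =>
    have hmaskc : PySem.Chars.isdigit c = false := by simpa using h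
    have hsp : PySem.Chars.isspace ' ' = true := by decide
    have hruns : pvRunsSum (c :: rest) = pvRunsSum rest := by
      simp [pvRunsSum, pvMask, hmaskc, PySem.Chars.split₀, PySem.Chars.split₀.go, hsp]
    rw [pvALoop]
    simp only [hmaskc, Bool.false_eq_true, dite_false, hw, if_true]
    rw [ih, hruns]
    simp only [pvColored, List.map_cons, List.sum_cons, hw, if_true]
    ring
  | case4 c rest cmc h hw ih =>
    have hmaskc : PySem.Chars.isdigit c = false := by simpa using h
    have hsp : PySem.Chars.isspace ' ' = true := by decide
    have hruns : pvRunsSum (c :: rest) = pvRunsSum rest := by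
      simp [pvRunsSum, pvMask, hmaskc, PySem.Chars.split₀, PySem.Chars.split₀.go, hsp]
    rw [pvALoop]
    simp only [hmaskc, Bool.false_eq_true, dite_false, hw, Bool.false_eq_true, if_false]
    rw [ih, hruns]
    simp [pvColored, hw]

-- ===== VERDICT (by name: the statement is the Claim_ definition above) =====
theorem parse_mana_cost_spec : Claim_equal_parse_mana_cost := by
  intro mana_cost _
  unfold Spec_parse_mana_cost parse_mana_cost parse_mana_cost_alt
  by_cases hg : (mana_cost = "" || mana_cost = "None") = true
  · simp [hg]
  · simp only [hg, Bool.false_eq_true, if_false]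
    rw [pvALoop_eq]
    simp [pvRunsSum, pvColored]
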